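-- pv_equiv track=rewrite | github.com/malvinachaos/polygon | BASE-01/src/psycho.py | dramatic
-- ===== SOURCE A (Python) =====
-- def dramatic(a):
--     ''' Между слов ставит многоточия '''
--     a, b = a.lower(), ""
--     for i, item in enumerate(a):
--         if item.isalnum() or (item in "\n\t "):
--             b += item
--     b = b.split()
--     b = "... ".join(b) + "..."
--     return b
-- ===== SOURCE B (Python) =====
-- def dramatic(a):
--     ''' Между слов ставит многоточия '''
--     words, buf = [], ""
--     for ch in a.lower():
--         if ch in "\n\t ":
--             if buf:
--                 words.append(buf)
--                 buf = ""
--         elif ch.isalnum():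
--             buf += ch
--     if buf:
--         words.append(buf)
--     return "... ".join(words) + "..."
-- ===== Notes on version B (the rewrite author's own statement) =====
-- stated objective: simpler
-- what changed: Replaces A's three-stage filter-then-split-then-join pipeline (enumerate loop building a filtered string, then str.split) by a single tokenizing pass that maintains a word buffer and flushes it at separator characters (newline, tab, space).
import Mathlib
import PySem

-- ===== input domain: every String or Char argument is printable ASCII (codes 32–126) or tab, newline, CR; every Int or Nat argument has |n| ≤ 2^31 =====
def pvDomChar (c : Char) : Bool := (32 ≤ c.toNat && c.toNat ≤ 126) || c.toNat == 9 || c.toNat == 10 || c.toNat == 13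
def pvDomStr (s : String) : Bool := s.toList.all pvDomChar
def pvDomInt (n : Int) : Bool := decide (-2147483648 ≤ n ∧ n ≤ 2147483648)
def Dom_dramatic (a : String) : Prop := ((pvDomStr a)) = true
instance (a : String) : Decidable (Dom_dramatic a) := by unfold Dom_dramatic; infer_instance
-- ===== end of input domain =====

-- B replaces A's filter-then-split decomposition by a single tokenizing pass with a
-- word buffer (objective: simpler one-pass decomposition; same cost).

-- ===== PORT A =====
-- A: lowercase, keep only alnum chars and "\n\t " (built by += in an enumerate loop),
-- split on whitespace, join with "... " and append "...".
def dramatic (a : String) : String :=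
  let a' := PySem.Chars.lower a.toList
  let b := (PySem.List.enumerate a').foldl
    (fun acc (p : Int × Char) =>
      if PySem.Chars.isalnum p.2 || PySem.Chars.isIn [p.2] ['\n', '\t', ' '] then acc ++ [p.2]
      else acc) ([] : List Char)
  let parts := PySem.Chars.split₀ b
  String.ofList (PySem.Chars.join "... ".toList parts ++ "...".toList)

-- ===== PORT B =====
-- one pass: flush the buffer at a separator, extend it on alnum, drop anything else
def dramaticTok : List Char → List (List Char) → List Char → List (List Char) × List Char
  | [], words, buf => (words, buf)
  | c :: rest, words, buf =>
    if PySem.Chars.isIn [c] ['\n', '\t', ' '] then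
      dramaticTok rest (if buf.isEmpty then words else words ++ [buf]) []
    else if PySem.Chars.isalnum c then
      dramaticTok rest words (buf ++ [c])
    else
      dramaticTok rest words buf

def dramatic_alt (a : String) : String :=
  let (words, buf) := dramaticTok (PySem.Chars.lower a.toList) [] []
  let words := if buf.isEmpty then words else words ++ [buf]
  String.ofList (PySem.Chars.join "... ".toList words ++ "...".toList)

-- ===== PRECONDITION & SPEC =====
def Spec_dramatic (a : String) (out : String) : Prop := out = dramatic_alt a
instance (a : String) (out : String) : Decidable (Spec_dramatic a out) := by unfold Spec_dramatic; infer_instance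

-- ===== CLAIM (what is proved, stated in full; the proofs are below) =====
def Claim_equal_dramatic : Prop := ∀ (a : String), Dom_dramatic a → Spec_dramatic a (dramatic a)

-- ===== LEMMAS AND PROOFS =====

-- the characters A keeps
def dramaticKeep (c : Char) : Bool :=
  PySem.Chars.isalnum c || PySem.Chars.isIn [c] ['\n', '\t', ' ']

lemma isIn_singleton_sep (c : Char) :
    PySem.Chars.isIn [c] ['\n', '\t', ' '] = true ↔ c ∈ ['\n', '\t', ' '] := by
  rw [PySem.Chars.isIn_iff_infix, List.singleton_infix_iff]

lemma isspace_of_sep (c : Char) (h : c ∈ ['\n', '\t', ' ']) :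
    PySem.Chars.isspace c = true := by
  simp only [List.mem_cons, List.not_mem_nil, or_false] at h
  rcases h with h | h | h <;> subst h <;> decide

lemma not_isspace_of_isalnum (c : Char) (h : PySem.Chars.isalnum c = true) :
    PySem.Chars.isspace c = false := by
  simp only [PySem.Chars.isalnum, PySem.Chars.isalpha, PySem.Chars.isupper,
    PySem.Chars.islower, PySem.Chars.isdigit, Char.le_def, UInt32.le_iff_toNat_le,
    Bool.or_eq_true, Bool.and_eq_true, decide_eq_true_eq] at h
  simp only [PySem.Chars.isspace, Bool.or_eq_false_iff, Bool.and_eq_false_iff,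
    decide_eq_false_iff_not, Char.toNat] at *
  have h1 : 'A'.val.toNat = 65 := rfl
  have h2 : 'Z'.val.toNat = 90 := rfl
  have h3 : 'a'.val.toNat = 97 := rfl
  have h4 : 'z'.val.toNat = 122 := rfl
  have h5 : '0'.val.toNat = 48 := rfl
  have h6 : '9'.val.toNat = 57 := rfl
  omega

-- A's accumulation loop over enumerate builds exactly the filtered list
lemma foldl_enumerate_keep (cs : List Char) (s : Int) (init : List Char) :
    (PySem.List.enumerate cs s).foldl
      (fun acc (p : Int × Char) => if dramaticKeep p.2 then acc ++ [p.2] else acc) init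
      = init ++ cs.filter dramaticKeep := by
  induction cs generalizing s init with
  | nil => simp [PySem.List.enumerate_nil]
  | cons c rest ih =>
    rw [PySem.List.enumerate_cons]
    simp only [List.foldl_cons]
    by_cases h : dramaticKeep c = true
    · rw [if_pos h, ih (s + 1) (init ++ [c]), List.filter_cons_of_pos h]
      simp
    · rw [if_neg (by simp [h]), ih (s + 1) init,
        List.filter_cons_of_neg (by simp [h])]

-- finalize B's tokenizer state
def dramaticFin (p : List (List Char) × List Char) : List (List Char) :=
  if p.2.isEmpty then p.1 else p.1 ++ [p.2]

-- the heart: splitting the filtered list equals the single tokenizing pass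
lemma split_filter_eq_tok (cs : List Char) (buf : List Char) (words : List (List Char)) :
    PySem.Chars.split₀.go (cs.filter dramaticKeep) buf.reverse words.reverse
      = dramaticFin (dramaticTok cs words buf) := by
  induction cs generalizing buf words with
  | nil =>
    simp only [List.filter_nil, PySem.Chars.split₀.go, dramaticTok, dramaticFin]
    by_cases h : buf.isEmpty = true
    · simp [List.isEmpty_iff.mp h]
    · simp only [Bool.not_eq_true] at h
      simp [h]
  | cons c rest ih =>
    by_cases hsep : PySem.Chars.isIn [c] ['\n', '\t', ' '] = true
    · have hsp : PySem.Chars.isspace c = true :=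
        isspace_of_sep c ((isIn_singleton_sep c).mp hsep)
      have hk : dramaticKeep c = true := by simp [dramaticKeep, hsep]
      rw [List.filter_cons_of_pos hk]
      simp only [PySem.Chars.split₀.go, hsp, if_true, dramaticTok, hsep]
      by_cases hb : buf.isEmpty = true
      · have hbe : buf = [] := List.isEmpty_iff.mp hb
        subst hbe
        simpa using ih [] words
      · simp only [Bool.not_eq_true] at hb
        rw [hb]
        have h1 : buf.reverse.isEmpty = false := by
          rw [List.isEmpty_reverse]; exact hb
        simp only [h1, Bool.false_eq_true, if_false, List.reverse_reverse,
          Bool.false_eq_true, if_false]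
        have h2 : (buf :: words.reverse) = (words ++ [buf]).reverse := by simp
        rw [h2]
        simpa using ih [] (words ++ [buf])
    · by_cases halnum : PySem.Chars.isalnum c = true
      · have hk : dramaticKeep c = true := by simp [dramaticKeep, halnum]
        have hsp : PySem.Chars.isspace c = false := not_isspace_of_isalnum c halnum
        rw [List.filter_cons_of_pos hk]
        simp only [PySem.Chars.split₀.go, hsp, Bool.false_eq_true, if_false,
          dramaticTok, hsep, if_false, halnum, if_true]
        have h2 : (c :: buf.reverse) = (buf ++ [c]).reverse := by simp
        rw [h2]
        exact ih (buf ++ [c]) words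
      · have hk : dramaticKeep c = false := by
          simp only [Bool.not_eq_true] at hsep halnum
          simp [dramaticKeep, hsep, halnum]
        rw [List.filter_cons_of_neg (by simp [hk])]
        simp only [dramaticTok, hsep, Bool.false_eq_true, if_false, halnum]
        exact ih buf words

-- ===== VERDICT (by name: the statement is the Claim_ definition above) =====
theorem dramatic_spec : Claim_equal_dramatic := by
  intro a _
  unfold Spec_dramatic
  show String.ofList (PySem.Chars.join "... ".toList
      (PySem.Chars.split₀ ((PySem.List.enumerate (PySem.Chars.lower a.toList)).foldl
        (fun acc (p : Int × Char) =>
          if dramaticKeep p.2 then acc ++ [p.2] else acc) [])) ++ "...".toList) = _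
  rw [foldl_enumerate_keep (PySem.Chars.lower a.toList) 0 [],
    List.nil_append, PySem.Chars.split₀]
  have h := split_filter_eq_tok (PySem.Chars.lower a.toList) [] []
  simp only [List.reverse_nil] at h
  rw [h]
  unfold dramatic_alt
  rcases hp : dramaticTok (PySem.Chars.lower a.toList) [] [] with ⟨w, b⟩
  simp [dramaticFin]
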